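-- pv_equiv track=rewrite | github.com/gmacgillivray/AdventOfCode2024 | AoC_2024_Puzzle 16e.py | draw_map
-- ===== SOURCE A (Python) =====
-- def replace_char_at_index(s, index, new_char):
--     # Convert the string to a list of characters
--     char_list = list(s)
--
--     # Replace the character at the specified index
--     char_list[index] = new_char
--
--     # Convert the list back to a string
--     return ''.join(char_list)
--
-- def replace_characters_in_map(p, c, m):
--     for y in range(len(m)):
--         for x in range(len(m[y])):
--             if len(p) != 2:
--                 if [x, y] in p:
--                     m[y] = replace_char_at_index(m[y], x, c)
--             else:
--                 if [x, y] == [p[0], p[1]]: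
--                     m[y] = replace_char_at_index(m[y], x, c)
--
--     return(m)
--
-- def draw_map(wandh, path, walls):
--
--     visual_map = []
--     row_string = ""
--
--     for i in range(wandh[0]):
--         row_string += "."
--
--     for j in range(wandh[1]):
--         visual_map.append(row_string)
--
--     visual_map = replace_characters_in_map(walls, "#", visual_map)
--     visual_map = replace_characters_in_map(path, "*", visual_map)
--
--     return visual_map
-- ===== SOURCE B (Python) =====
-- def draw_map(wandh, path, walls):
--     w, h = wandh[0], wandh[1]
--     grid = [["."] * w for _ in range(h)]
--     for pts, c in ((walls, "#"), (path, "*")):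
--         for p in pts:
--             if len(p) == 2:
--                 x, y = p
--                 if 0 <= x < w and 0 <= y < h:
--                     grid[y][x] = c
--     return ["".join(row) for row in grid]
-- ===== Notes on version B (the rewrite author's own statement) =====
-- stated objective: faster
-- what changed: B allocates the w-by-h grid of '.' rows once as char arrays and writes only the wall/path coordinates directly by index, instead of A's scan of every cell against every point with a full string rebuild per replacement; B also drops A's len(p)==2 special case, which makes A silently draw nothing when a layer has exactly two points.
-- intended difference: When path or walls has exactly two entries at least one of which is an in-grid [x,y] pair (and, for walls, one not already covered by a drawn path point), A treats the list as a single malformed coordinate and draws none of its points, while B draws both; drawing the listed points is evidently the intended behaviour. — e.g. on draw_map([3, 2], [[0, 0], [1, 1]], []): A returns ["...", "..."], B returns ["*..", ".*."]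
import Mathlib
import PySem

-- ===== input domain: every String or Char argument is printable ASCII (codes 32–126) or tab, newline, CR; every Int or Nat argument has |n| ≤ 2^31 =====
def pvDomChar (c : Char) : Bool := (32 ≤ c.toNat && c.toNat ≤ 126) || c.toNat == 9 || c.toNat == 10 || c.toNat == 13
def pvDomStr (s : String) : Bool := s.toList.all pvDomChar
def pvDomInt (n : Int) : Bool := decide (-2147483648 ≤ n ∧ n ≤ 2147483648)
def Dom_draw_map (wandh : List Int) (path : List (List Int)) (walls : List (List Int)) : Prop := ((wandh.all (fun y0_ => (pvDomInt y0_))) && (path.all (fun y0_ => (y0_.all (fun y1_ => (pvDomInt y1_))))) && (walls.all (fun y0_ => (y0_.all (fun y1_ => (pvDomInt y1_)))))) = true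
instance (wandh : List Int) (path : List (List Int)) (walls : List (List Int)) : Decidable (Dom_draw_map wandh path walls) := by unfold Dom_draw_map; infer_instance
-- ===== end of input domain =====

-- B builds the grid once as char rows and writes only the given coordinates by index (A rescans all
-- points per cell and rebuilds a whole row string per write); B also drops A's len(p)==2 special case,
-- under which A silently draws nothing for a two-point layer — see D_draw_map below.

-- ===== PORT A =====
-- replace_char_at_index(s, index, new_char): list(s); char_list[index] = new_char; ''.join.
-- At every reachable call site index is a nonnegative in-range position (x ∈ range(len(s))),
-- so .toNat and List.set are exact there.
def pyReplaceCharAtIndex (s : String) (index : Int) (newChar : Char) : String :=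
  String.ofList (s.toList.set index.toNat newChar)

-- replace_characters_in_map(p, c, m): nested index loops mutating m in place.
-- In the else-branch Python compares [x, y] (two ints) with [p[0], p[1]] (two lists of ints);
-- on the typed inputs of this task that comparison is always False, ported exactly as no-op.
def pyReplaceCharsInMap (p : List (List Int)) (c : Char) (m : List String) : List String :=
  (PySem.List.pyRange 0 (PySem.List.len m) 1).foldl (fun m y =>
    (PySem.List.pyRange 0 (PySem.Str.len ((PySem.List.pyGet? m y).getD "")) 1).foldl (fun m x =>
      if p.length ≠ 2 then
        if [x, y] ∈ p then m.modify y.toNat (fun s => pyReplaceCharAtIndex s x c) else m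
      else
        m) m) m

def draw_map (wandh : List Int) (path : List (List Int)) (walls : List (List Int)) : List String :=
  -- wandh[0] / wandh[1] raise IndexError when wandh has fewer than two entries: excluded by Pre_.
  let w := (PySem.List.pyGet? wandh 0).getD 0
  let h := (PySem.List.pyGet? wandh 1).getD 0
  let row_string := (PySem.List.pyRange 0 w 1).foldl (fun s _ => s ++ ".") ""
  let visual_map := (PySem.List.pyRange 0 h 1).foldl (fun l _ => l ++ [row_string]) []
  let visual_map := pyReplaceCharsInMap walls '#' visual_map
  let visual_map := pyReplaceCharsInMap path '*' visual_map
  visual_map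

-- ===== PORT B =====
-- for p in pts: if len(p)==2 and 0<=x<w and 0<=y<h: grid[y][x] = c
def pvDrawLayer (pts : List (List Int)) (c : Char) (w h : Int) (grid : List (List Char)) : List (List Char) :=
  pts.foldl (fun g p =>
    match p with
    | [x, y] =>
        if 0 ≤ x ∧ x < w ∧ 0 ≤ y ∧ y < h then
          g.modify y.toNat (fun row => row.set x.toNat c)
        else g
    | _ => g) grid

def draw_map_alt (wandh : List Int) (path : List (List Int)) (walls : List (List Int)) : List String :=
  -- wandh[0] / wandh[1] raise IndexError when wandh has fewer than two entries: excluded by Pre_.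
  let w := (PySem.List.pyGet? wandh 0).getD 0
  let h := (PySem.List.pyGet? wandh 1).getD 0
  -- [["."] * w for _ in range(h)]  (a negative count gives the empty list, as in Python)
  let grid := List.replicate h.toNat (List.replicate w.toNat '.')
  let grid := pvDrawLayer walls '#' w h grid
  let grid := pvDrawLayer path '*' w h grid
  grid.map (fun row => String.ofList row)

-- ===== PRECONDITION & SPEC =====
-- Pre_ excludes only the inputs on which A raises IndexError (wandh shorter than two entries).
def Pre_draw_map (wandh : List Int) (path : List (List Int)) (walls : List (List Int)) : Prop :=
  2 ≤ wandh.length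
instance (wandh : List Int) (path : List (List Int)) (walls : List (List Int)) : Decidable (Pre_draw_map wandh path walls) := by unfold Pre_draw_map; infer_instance

def pvWitness_draw_map : List Int × List (List Int) × List (List Int) :=
  ([3, 2], [[1, 1]], [[0, 0], [2, 0], [2, 1]])

-- p is an in-grid coordinate pair (wandh.getD 0 0 = width, wandh.getD 1 0 = height)
def pvDrawable (wandh : List Int) (p : List Int) : Prop :=
  p.length = 2 ∧ 0 ≤ p.getD 0 0 ∧ p.getD 0 0 < wandh.getD 0 0 ∧
    0 ≤ p.getD 1 0 ∧ p.getD 1 0 < wandh.getD 1 0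

-- When path or walls has exactly two entries at least one of which is an in-grid [x,y] pair (for walls,
-- one not also listed in path), A treats the list as a single malformed coordinate and draws none of
-- its points, while B draws them; drawing the listed points is intended.
def D_draw_map (wandh : List Int) (path : List (List Int)) (walls : List (List Int)) : Prop :=
  (path.length = 2 ∧ ∃ p ∈ path, pvDrawable wandh p) ∨
  (walls.length = 2 ∧ ∃ p ∈ walls, pvDrawable wandh p ∧ p ∉ path)
instance (wandh : List Int) (path : List (List Int)) (walls : List (List Int)) : Decidable (D_draw_map wandh path walls) := by unfold D_draw_map pvDrawable; infer_instance

def Spec_draw_map (wandh : List Int) (path : List (List Int)) (walls : List (List Int)) (out : List String) : Prop := ¬ D_draw_map wandh path walls → out = draw_map_alt wandh path walls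
instance (wandh : List Int) (path : List (List Int)) (walls : List (List Int)) (out : List String) : Decidable (Spec_draw_map wandh path walls out) := by unfold Spec_draw_map; infer_instance

def pvDiffWitness_draw_map : List Int × List (List Int) × List (List Int) :=
  ([3, 2], [[0, 0], [1, 1]], [])
def pvDiffWitnessOut_draw_map : (List String) × (List String) :=
  (["...", "..."], ["*..", ".*."])

-- ===== CLAIM (what is proved, stated in full; the proofs are below) =====
def Claim_unchanged_draw_map : Prop := ∀ (wandh : List Int) (path : List (List Int)) (walls : List (List Int)), Dom_draw_map wandh path walls → Pre_draw_map wandh path walls → Spec_draw_map wandh path walls (draw_map wandh path walls)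
def Claim_changed_draw_map : Prop := Dom_draw_map (pvDiffWitness_draw_map.1) (pvDiffWitness_draw_map.2.1) (pvDiffWitness_draw_map.2.2) ∧ Pre_draw_map (pvDiffWitness_draw_map.1) (pvDiffWitness_draw_map.2.1) (pvDiffWitness_draw_map.2.2) ∧ D_draw_map (pvDiffWitness_draw_map.1) (pvDiffWitness_draw_map.2.1) (pvDiffWitness_draw_map.2.2) ∧ draw_map (pvDiffWitness_draw_map.1) (pvDiffWitness_draw_map.2.1) (pvDiffWitness_draw_map.2.2) = pvDiffWitnessOut_draw_map.1 ∧ draw_map_alt (pvDiffWitness_draw_map.1) (pvDiffWitness_draw_map.2.1) (pvDiffWitness_draw_map.2.2) = pvDiffWitnessOut_draw_map.2 ∧ pvDiffWitnessOut_draw_map.1 ≠ pvDiffWitnessOut_draw_map.2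
def Claim_exact_draw_map : Prop := ∀ (wandh : List Int) (path : List (List Int)) (walls : List (List Int)), Dom_draw_map wandh path walls → Pre_draw_map wandh path walls → D_draw_map wandh path walls → draw_map wandh path walls ≠ draw_map_alt wandh path walls

-- ===== LEMMAS AND PROOFS =====

-- ---- generic helpers ----

theorem pv_modify_modify {α : Type} (l : List α) (n : Nat) (f g : α → α) :
    (l.modify n f).modify n g = l.modify n (fun x => g (f x)) := by
  apply List.ext_getElem?
  intro m
  simp [List.getElem?_modify]
  split
  · cases l[m]? <;> simp
  · cases l[m]? <;> simp

theorem pv_modify_congr {α : Type} (l : List α) (n : Nat) (f g : α → α)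
    (h : ∀ (hn : n < l.length), f l[n] = g l[n]) : l.modify n f = l.modify n g := by
  apply List.ext_getElem?
  intro m
  simp only [List.getElem?_modify]
  by_cases hm : n = m
  · subst hm
    by_cases hn : n < l.length
    · simp [List.getElem?_eq_getElem hn, h hn]
    · rw [List.getElem?_eq_none_iff.mpr (by omega)]; simp
  · simp [hm]

-- a fold whose step only modifies row n is the modification of row n by the folded row-function
theorem pv_foldl_hoist {α β : Type} (cnd : α → Prop) [DecidablePred cnd] (f : α → β → β)
    (n : Nat) : ∀ (l : List α) (m : List β),
    l.foldl (fun m a => if cnd a then m.modify n (f a) else m) m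
      = m.modify n (fun r => l.foldl (fun r a => if cnd a then f a r else r) r) := by
  intro l
  induction l with
  | nil =>
    intro m
    exact (List.modify_id n m).symm
  | cons a l ih =>
    intro m
    by_cases ha : cnd a
    · simp only [List.foldl_cons, if_pos ha, ih, pv_modify_modify]
    · simp only [List.foldl_cons, if_neg ha, ih]

-- a fold of modifications at pairwise distinct rows, read back row by row
theorem pv_foldl_modifies_getElem? {β : Type} (G : Nat → β → β) :
    ∀ (ys : List Nat), ys.Nodup → ∀ (m : List β) (i : Nat),
    (ys.foldl (fun m y => m.modify y (G y)) m)[i]? =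
      if i ∈ ys then (m[i]?).map (G i) else m[i]? := by
  intro ys
  induction ys with
  | nil => intro _ m i; simp
  | cons y ys ih =>
    intro hnd m i
    have hnd' := hnd
    rw [List.nodup_cons] at hnd'
    simp only [List.foldl_cons, ih hnd'.2]
    by_cases hmem : i ∈ ys
    · have hne : y ≠ i := fun h => hnd'.1 (h ▸ hmem)
      simp [hmem, hne]
    · by_cases hiy : i = y
      · subst hiy
        simp [hmem]
      · have hyi : y ≠ i := fun h => hiy h.symm
        simp [hmem, hiy, hyi]

theorem pv_setfold_length (cnd : Nat → Prop) [DecidablePred cnd] (c : Char) (xs : List Nat) :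
    ∀ (r : List Char), (xs.foldl (fun r k => if cnd k then r.set k c else r) r).length = r.length := by
  induction xs with
  | nil => intro r; rfl
  | cons k xs ih => intro r; by_cases hk : cnd k <;> simp [hk, ih]

-- the conditional set-fold over an index range, read back pointwise
theorem pv_setfold_getElem? (cnd : Nat → Prop) [DecidablePred cnd] (c : Char) :
    ∀ (n : Nat) (r : List Char) (i : Nat),
    ((List.range n).foldl (fun r k => if cnd k then r.set k c else r) r)[i]? =
      if cnd i ∧ i < n then (if i < r.length then some c else none) else r[i]? := by
  intro n
  induction n with
  | zero => intro r i; simp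
  | succ n ih =>
    intro r i
    rw [List.range_succ, List.foldl_append]
    simp only [List.foldl_cons, List.foldl_nil]
    have hlen : (List.foldl (fun r k => if cnd k then r.set k c else r) r (List.range n)).length
        = r.length := pv_setfold_length cnd c _ r
    by_cases hcn : cnd n
    · rw [if_pos hcn, List.getElem?_set, ih r i, hlen]
      by_cases hin : n = i
      · subst hin
        simp [hcn]
      · have : i ≠ n := fun h => hin h.symm
        simp only [if_neg hin]
        by_cases hci : cnd i
        · by_cases hi : i < n
          · simp [hci, hi, Nat.lt_succ_of_lt hi]
          · have : ¬ (i < n + 1) := by omega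
            simp [hci, hi, this]
        · simp [hci]
    · rw [if_neg hcn, ih r i]
      by_cases hci : cnd i
      · by_cases hi : i < n
        · simp [hci, hi, Nat.lt_succ_of_lt hi]
        · have h2 : ¬ (i < n + 1) := by
            rcases Nat.lt_or_ge i n with h | h
            · exact absurd h hi
            · intro hlt
              have : i = n := by omega
              exact hcn (this ▸ hci)
          simp [hci, hi, h2]
      · simp [hci]

-- ---- A-side characterization ----

-- the row operation A performs on row y (self-contained: the range bound is the row's own length)
def pvRowOp (p : List (List Int)) (c : Char) (y : Int) (s : String) : String :=
  (PySem.List.pyRange 0 (PySem.Str.len s) 1).foldl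
    (fun s x => if p.length ≠ 2 ∧ [x, y] ∈ p then pyReplaceCharAtIndex s x c else s) s

theorem pv_strfold_toList (cnd : Nat → Prop) [DecidablePred cnd] (c : Char) :
    ∀ (xs : List Nat) (s : String),
    (xs.foldl (fun s k => if cnd k then pyReplaceCharAtIndex s (↑k) c else s) s).toList =
      xs.foldl (fun r k => if cnd k then r.set k c else r) s.toList := by
  intro xs
  induction xs with
  | nil => intro s; rfl
  | cons k xs ih =>
    intro s
    simp only [List.foldl_cons]
    by_cases hk : cnd k
    · rw [if_pos hk, if_pos hk, ih]
      simp [pyReplaceCharAtIndex]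
    · rw [if_neg hk, if_neg hk, ih]

theorem pvRowOp_toList_getElem? (p : List (List Int)) (c : Char) (y : Int) (s : String) (x : Nat) :
    (pvRowOp p c y s).toList[x]? =
      if (p.length ≠ 2 ∧ [(x : Int), y] ∈ p) ∧ x < s.toList.length then some c
      else s.toList[x]? := by
  unfold pvRowOp
  rw [PySem.Str.len_eq, PySem.List.pyRange_zero_natCast, List.foldl_map]
  rw [pv_strfold_toList (fun k => p.length ≠ 2 ∧ [(k : Int), y] ∈ p) c (List.range s.toList.length) s]
  rw [pv_setfold_getElem? (fun k => p.length ≠ 2 ∧ [(k : Int), y] ∈ p) c s.toList.length s.toList x]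
  split
  · next hcond => rw [if_pos hcond.2]
  · rfl

theorem pvRowOp_toList_length (p : List (List Int)) (c : Char) (y : Int) (s : String) :
    (pvRowOp p c y s).toList.length = s.toList.length := by
  unfold pvRowOp
  rw [PySem.Str.len_eq, PySem.List.pyRange_zero_natCast, List.foldl_map]
  rw [pv_strfold_toList (fun k => p.length ≠ 2 ∧ [(k : Int), y] ∈ p) c (List.range s.toList.length) s]
  exact pv_setfold_length (fun k => p.length ≠ 2 ∧ [(k : Int), y] ∈ p) c (List.range s.toList.length) s.toList

theorem pv_inner_eq (p : List (List Int)) (c : Char) (m : List String) (y : Int) (hy0 : 0 ≤ y) :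
    (PySem.List.pyRange 0 (PySem.Str.len ((PySem.List.pyGet? m y).getD "")) 1).foldl
      (fun m x =>
        if p.length ≠ 2 then
          if [x, y] ∈ p then m.modify y.toNat (fun s => pyReplaceCharAtIndex s x c) else m
        else m) m
      = m.modify y.toNat (pvRowOp p c y) := by
  have hfun : (fun (m : List String) (x : Int) =>
      if p.length ≠ 2 then
        if [x, y] ∈ p then m.modify y.toNat (fun s => pyReplaceCharAtIndex s x c) else m
      else m)
    = (fun (m : List String) (x : Int) =>
      if p.length ≠ 2 ∧ [x, y] ∈ p then m.modify y.toNat (fun s => pyReplaceCharAtIndex s x c)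
      else m) := by
    funext m x
    split_ifs <;> tauto
  rw [hfun,
    pv_foldl_hoist (fun x => p.length ≠ 2 ∧ [x, y] ∈ p) (fun x s => pyReplaceCharAtIndex s x c)
      y.toNat _ m]
  apply pv_modify_congr
  intro hn
  have hget : (PySem.List.pyGet? m y).getD "" = m[y.toNat] := by
    rw [PySem.List.pyGet?_of_nonneg (h := hy0), List.getElem?_eq_getElem hn]
    rfl
  rw [hget]
  rfl

theorem pv_rcim_getElem? (p : List (List Int)) (c : Char) (m : List String) (i : Nat) :
    (pyReplaceCharsInMap p c m)[i]? = (m[i]?).map (pvRowOp p c (↑i)) := by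
  unfold pyReplaceCharsInMap
  rw [PySem.List.len_eq, PySem.List.pyRange_zero_natCast, List.foldl_map]
  have hbody : (fun (m : List String) (k : Nat) =>
      (PySem.List.pyRange 0 (PySem.Str.len ((PySem.List.pyGet? m (↑k)).getD "")) 1).foldl
        (fun m x =>
          if p.length ≠ 2 then
            if [x, (↑k : Int)] ∈ p then
              m.modify (↑k : Int).toNat (fun s => pyReplaceCharAtIndex s x c)
            else m
          else m) m)
      = (fun (m : List String) (k : Nat) => m.modify k (pvRowOp p c (↑k))) := by
    funext m k
    have h := pv_inner_eq p c m (↑k) (Int.natCast_nonneg k)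
    simpa using h
  rw [hbody, pv_foldl_modifies_getElem? (fun k => pvRowOp p c (↑k)) (List.range m.length)
    List.nodup_range m i]
  by_cases him : i < m.length
  · simp [him]
  · rw [if_neg (by simp [him]), List.getElem?_eq_none_iff.mpr (by omega)]
    rfl

-- ---- B-side characterization ----

theorem pv_layer_cell (c : Char) (w h : Int) :
    ∀ (pts : List (List Int)) (g : List (List Char)),
    g.length = h.toNat → (∀ (i : Nat) (r : List Char), g[i]? = some r → r.length = w.toNat) →
    ∀ (x y : Nat), x < w.toNat → y < h.toNat →
    ((pvDrawLayer pts c w h g)[y]?.bind fun r => r[x]?) =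
      if [(x : Int), (y : Int)] ∈ pts then some c else (g[y]?.bind fun r => r[x]?) := by
  intro pts
  induction pts with
  | nil => intro g _ _ x y _ _; simp [pvDrawLayer]
  | cons p pts ih =>
    intro g hlen hrow x y hx hy
    rcases p with _ | ⟨a, p1⟩
    · rw [show pvDrawLayer ([] :: pts) c w h g = pvDrawLayer pts c w h g from rfl,
        ih g hlen hrow x y hx hy]
      exact if_congr (by simp) rfl rfl
    rcases p1 with _ | ⟨b, p2⟩
    · rw [show pvDrawLayer ([a] :: pts) c w h g = pvDrawLayer pts c w h g from rfl,
        ih g hlen hrow x y hx hy]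
      exact if_congr (by simp) rfl rfl
    rcases p2 with _ | ⟨e, p3⟩
    · -- head is [a, b]
      rw [show pvDrawLayer ([a, b] :: pts) c w h g = pvDrawLayer pts c w h
          (if 0 ≤ a ∧ a < w ∧ 0 ≤ b ∧ b < h then
            g.modify b.toNat (fun row => row.set a.toNat c) else g) from rfl]
      by_cases hr : 0 ≤ a ∧ a < w ∧ 0 ≤ b ∧ b < h
      · rw [if_pos hr]
        have hlen' : (g.modify b.toNat (fun row => row.set a.toNat c)).length = h.toNat := by
          simp [hlen]
        have hrow' : ∀ (i : Nat) (r : List Char),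
            (g.modify b.toNat (fun row => row.set a.toNat c))[i]? = some r →
            r.length = w.toNat := by
          intro i r hir
          rw [List.getElem?_modify] at hir
          cases hg : g[i]? with
          | none =>
            rw [hg] at hir
            exact absurd hir (by simp)
          | some r0 =>
            rw [hg] at hir
            simp only [Option.map_eq_map, Option.map_some, Option.some.injEq] at hir
            rw [← hir]
            split <;> simp [hrow i r0 hg]
        rw [ih _ hlen' hrow' x y hx hy]
        by_cases hmem : [(x : Int), (y : Int)] ∈ pts
        · rw [if_pos hmem, if_pos (List.mem_cons_of_mem _ hmem)]
        · rw [if_neg hmem]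
          have hyg : y < g.length := by omega
          have hrowy : g[y].length = w.toNat := hrow y g[y] (List.getElem?_eq_getElem hyg)
          have hcell : ((g.modify b.toNat (fun row => row.set a.toNat c))[y]?.bind
                fun r => r[x]?) =
              if a = (x : Int) ∧ b = (y : Int) then some c
              else (g[y]?.bind fun r => r[x]?) := by
            rw [List.getElem?_modify, List.getElem?_eq_getElem hyg]
            by_cases hby : b.toNat = y
            · simp only [Option.map_eq_map, Option.map_some, Option.bind_some, if_pos hby]
              by_cases hax : a.toNat = x
              · have hab : a = (x : Int) ∧ b = (y : Int) := by omega
                rw [if_pos hab, ← hax]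
                exact List.getElem?_set_self (by omega)
              · have hab : ¬ (a = (x : Int) ∧ b = (y : Int)) := by omega
                rw [if_neg hab, List.getElem?_set_ne (by omega)]

            · simp only [Option.map_eq_map, Option.map_some, Option.bind_some, if_neg hby]
              rw [if_neg (show ¬ (a = (x : Int) ∧ b = (y : Int)) from by omega)]
          rw [hcell]
          by_cases hhead : a = (x : Int) ∧ b = (y : Int)
          · have hm : [(x : Int), (y : Int)] ∈ [a, b] :: pts := by
              refine List.mem_cons.mpr (Or.inl ?_)
              rw [hhead.1, hhead.2]
            rw [if_pos hhead, if_pos hm]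
          · have hm : [(x : Int), (y : Int)] ∉ [a, b] :: pts := by
              intro hmm
              rcases List.mem_cons.mp hmm with heq | hmm2
              · injection heq with h1 h2
                injection h2 with h3 _
                exact hhead ⟨h1.symm, h3.symm⟩
              · exact hmem hmm2
            rw [if_neg hhead, if_neg hm]
      · rw [if_neg hr, ih g hlen hrow x y hx hy]
        by_cases hmem : [(x : Int), (y : Int)] ∈ pts
        · rw [if_pos hmem, if_pos (List.mem_cons_of_mem _ hmem)]
        · have hm : [(x : Int), (y : Int)] ∉ [a, b] :: pts := by
            intro hmm
            rcases List.mem_cons.mp hmm with heq | hmm2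
            · injection heq with h1 h2
              injection h2 with h3 _
              apply hr
              refine ⟨by omega, by omega, by omega, by omega⟩
            · exact hmem hmm2
          rw [if_neg hmem, if_neg hm]
    · rw [show pvDrawLayer ((a :: b :: e :: p3) :: pts) c w h g = pvDrawLayer pts c w h g
          from rfl,
        ih g hlen hrow x y hx hy]
      exact if_congr (by simp) rfl rfl

theorem pv_layer_shape (c : Char) (w h : Int) :
    ∀ (pts : List (List Int)) (g : List (List Char)),
    (pvDrawLayer pts c w h g).length = g.length ∧
    (∀ i : Nat, ((pvDrawLayer pts c w h g)[i]?).map List.length = (g[i]?).map List.length) := by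
  intro pts
  induction pts with
  | nil => intro g; exact ⟨rfl, fun i => rfl⟩
  | cons p pts ih =>
    intro g
    rcases p with _ | ⟨a, p1⟩
    · exact ih g
    rcases p1 with _ | ⟨b, p2⟩
    · exact ih g
    rcases p2 with _ | ⟨e, p3⟩
    · -- head is [a, b]
      have hstep : pvDrawLayer ([a, b] :: pts) c w h g = pvDrawLayer pts c w h
          (if 0 ≤ a ∧ a < w ∧ 0 ≤ b ∧ b < h then
            g.modify b.toNat (fun row => row.set a.toNat c) else g) := rfl
      rw [hstep]
      by_cases hr : 0 ≤ a ∧ a < w ∧ 0 ≤ b ∧ b < h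
      · rw [if_pos hr]
        obtain ⟨h1, h2⟩ := ih (g.modify b.toNat (fun row => row.set a.toNat c))
        refine ⟨by rw [h1]; simp, fun i => ?_⟩
        rw [h2 i, List.getElem?_modify]
        by_cases hbi : b.toNat = i
        · subst hbi; cases g[b.toNat]? <;> simp
        · simp [hbi]
      · rw [if_neg hr]; exact ih g
    · exact ih g

-- ---- assembly ----

theorem pv_rowfold (l : List Int) (s : String) :
    (l.foldl (fun s _ => s ++ ".") s) = s ++ String.ofList (List.replicate l.length '.') := by
  induction l generalizing s with
  | nil => simp
  | cons a l ih =>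
    simp only [List.foldl_cons, ih, List.length_cons]
    apply String.toList_inj.mp
    simp [List.replicate_succ]

theorem pv_mapfold (l : List Int) (row : String) :
    ∀ (acc : List String), (l.foldl (fun l _ => l ++ [row]) acc) = acc ++ List.replicate l.length row := by
  induction l with
  | nil => intro acc; simp
  | cons a l ih =>
    intro acc
    simp [ih, List.replicate_succ]


-- the character program A puts at in-grid cell (x, y)
theorem pv_A_cell (wandh : List Int) (path walls : List (List Int)) (x y : Nat)
    (hx : x < ((PySem.List.pyGet? wandh 0).getD 0).toNat)
    (hy : y < ((PySem.List.pyGet? wandh 1).getD 0).toNat) :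
    ((draw_map wandh path walls)[y]?.bind fun s => s.toList[x]?) =
      some (if path.length ≠ 2 ∧ [(x : Int), (y : Int)] ∈ path then '*'
        else if walls.length ≠ 2 ∧ [(x : Int), (y : Int)] ∈ walls then '#' else '.') := by
  unfold draw_map
  dsimp only
  rw [pv_rowfold, pv_mapfold]
  set w := (PySem.List.pyGet? wandh 0).getD 0 with hw
  set h := (PySem.List.pyGet? wandh 1).getD 0 with hh
  rw [show ((PySem.List.pyRange 0 w 1).length) = w.toNat from by
        rw [PySem.List.length_pyRange_one]; omega,
      show ((PySem.List.pyRange 0 h 1).length) = h.toNat from by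
        rw [PySem.List.length_pyRange_one]; omega]
  rw [show ("" ++ String.ofList (List.replicate w.toNat '.')) =
      String.ofList (List.replicate w.toNat '.') from by
    apply String.toList_inj.mp; simp, List.nil_append]
  rw [pv_rcim_getElem?, pv_rcim_getElem?, List.getElem?_replicate, if_pos hy]
  simp only [Option.map_some, Option.bind_some]
  rw [pvRowOp_toList_getElem?, pvRowOp_toList_length, String.toList_ofList,
    List.length_replicate, pvRowOp_toList_getElem?, String.toList_ofList,
    List.length_replicate, List.getElem?_replicate]
  simp only [eq_true hx, and_true, if_true]
  split_ifs <;> rfl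

-- the character program B puts at in-grid cell (x, y)
theorem pv_B_cell (wandh : List Int) (path walls : List (List Int)) (x y : Nat)
    (hx : x < ((PySem.List.pyGet? wandh 0).getD 0).toNat)
    (hy : y < ((PySem.List.pyGet? wandh 1).getD 0).toNat) :
    ((draw_map_alt wandh path walls)[y]?.bind fun s => s.toList[x]?) =
      some (if [(x : Int), (y : Int)] ∈ path then '*'
        else if [(x : Int), (y : Int)] ∈ walls then '#' else '.') := by
  unfold draw_map_alt
  dsimp only
  set w := (PySem.List.pyGet? wandh 0).getD 0 with hw
  set h := (PySem.List.pyGet? wandh 1).getD 0 with hh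
  have hg0row : ∀ (i : Nat) (r : List Char),
      (List.replicate h.toNat (List.replicate w.toNat '.'))[i]? = some r →
      r.length = w.toNat := by
    intro i r hir
    rw [List.getElem?_replicate] at hir
    split at hir
    · cases hir; simp
    · cases hir
  have hs1 := pv_layer_shape '#' w h walls (List.replicate h.toNat (List.replicate w.toNat '.'))
  have hg1len : (pvDrawLayer walls '#' w h
      (List.replicate h.toNat (List.replicate w.toNat '.'))).length = h.toNat := by
    rw [hs1.1]; simp
  have hg1row : ∀ (i : Nat) (r : List Char),
      (pvDrawLayer walls '#' w h (List.replicate h.toNat (List.replicate w.toNat '.')))[i]? =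
        some r → r.length = w.toNat := by
    intro i r hir
    have h2 := hs1.2 i
    rw [hir] at h2
    cases hg : (List.replicate h.toNat (List.replicate w.toNat '.'))[i]? with
    | none => rw [hg] at h2; simp at h2
    | some r0 =>
      rw [hg] at h2
      simp only [Option.map_some, Option.some.injEq] at h2
      rw [h2]
      exact hg0row i r0 hg
  have hcell : ((pvDrawLayer path '*' w h (pvDrawLayer walls '#' w h
      (List.replicate h.toNat (List.replicate w.toNat '.'))))[y]?.bind fun r => r[x]?) =
      if [(x : Int), (y : Int)] ∈ path then some '*'
      else if [(x : Int), (y : Int)] ∈ walls then some '#' else some '.' := by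
    rw [pv_layer_cell '*' w h path _ hg1len hg1row x y hx hy,
      pv_layer_cell '#' w h walls _ (by simp) hg0row x y hx hy,
      show ((List.replicate h.toNat (List.replicate w.toNat '.'))[y]?.bind
        fun r => r[x]?) = some '.' from by
        rw [List.getElem?_replicate, if_pos hy, Option.bind_some,
          List.getElem?_replicate, if_pos hx]]
  have hig2 : y < (pvDrawLayer path '*' w h (pvDrawLayer walls '#' w h
      (List.replicate h.toNat (List.replicate w.toNat '.')))).length := by
    rw [(pv_layer_shape '*' w h path _).1, hg1len]; omega
  rw [List.getElem?_map, List.getElem?_eq_getElem hig2]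
  rw [List.getElem?_eq_getElem hig2, Option.bind_some] at hcell
  simp only [Option.map_some, Option.bind_some, String.toList_ofList]
  rw [hcell]
  split_ifs <;> rfl

-- ===== VERDICT (by name: the statement is the Claim_ definition above) =====
-- the per-cell value the two programs agree on outside D_
theorem pv_cell_eq (wandh : List Int) (path walls : List (List Int))
    (hD : ¬ D_draw_map wandh path walls) (hPre : 2 ≤ wandh.length)
    (x y : Nat) (hx : x < ((PySem.List.pyGet? wandh 0).getD 0).toNat)
    (hy : y < ((PySem.List.pyGet? wandh 1).getD 0).toNat) :
    (if (path.length ≠ 2 ∧ [(x : Int), (y : Int)] ∈ path) ∧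
        x < ((PySem.List.pyGet? wandh 0).getD 0).toNat then some '*'
     else if (walls.length ≠ 2 ∧ [(x : Int), (y : Int)] ∈ walls) ∧
        x < ((PySem.List.pyGet? wandh 0).getD 0).toNat then some '#'
     else if x < ((PySem.List.pyGet? wandh 0).getD 0).toNat then some '.' else none)
    = (if [(x : Int), (y : Int)] ∈ path then some '*'
       else if [(x : Int), (y : Int)] ∈ walls then some '#' else some '.') := by
  have hw0 : wandh.getD 0 0 = (PySem.List.pyGet? wandh 0).getD 0 := by
    rw [PySem.List.pyGet?_of_nonneg (h := by norm_num)]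
    rw [List.getD_eq_getElem?_getD]
    rfl
  have hw1 : wandh.getD 1 0 = (PySem.List.pyGet? wandh 1).getD 0 := by
    rw [PySem.List.pyGet?_of_nonneg (h := by norm_num)]
    rw [List.getD_eq_getElem?_getD]
    rfl
  have hdr : pvDrawable wandh [(x : Int), (y : Int)] := by
    refine ⟨rfl, by simp, ?_, by simp, ?_⟩
    · show ((x : Int)) < wandh.getD 0 0
      rw [hw0]; omega
    · show ((y : Int)) < wandh.getD 1 0
      rw [hw1]; omega
  unfold D_draw_map at hD
  simp only [eq_true hx, and_true, if_true]
  by_cases hp2 : path.length = 2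
  · have hnp : [(x : Int), (y : Int)] ∉ path := fun hmem =>
      hD (Or.inl ⟨hp2, _, hmem, hdr⟩)
    rw [if_neg (by tauto), if_neg hnp]
    by_cases hw2 : walls.length = 2
    · have hnw : [(x : Int), (y : Int)] ∉ walls := fun hmem =>
        hD (Or.inr ⟨hw2, _, hmem, hdr, hnp⟩)
      rw [if_neg (by tauto), if_neg hnw]
    · exact if_congr (by tauto) rfl rfl
  · rw [if_congr (show (path.length ≠ 2 ∧ [(x : Int), (y : Int)] ∈ path) ↔
      [(x : Int), (y : Int)] ∈ path from by tauto) rfl rfl]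
    by_cases hmp : [(x : Int), (y : Int)] ∈ path
    · rw [if_pos hmp, if_pos hmp]
    · rw [if_neg hmp, if_neg hmp]
      by_cases hw2 : walls.length = 2
      · have hnw : [(x : Int), (y : Int)] ∉ walls := fun hmem =>
          hD (Or.inr ⟨hw2, _, hmem, hdr, hmp⟩)
        rw [if_neg (by tauto), if_neg hnw]
      · exact if_congr (by tauto) rfl rfl

theorem draw_map_spec : Claim_unchanged_draw_map := by
  intro wandh path walls hDom hPre hD
  show draw_map wandh path walls = draw_map_alt wandh path walls
  unfold draw_map draw_map_alt
  dsimp only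
  rw [pv_rowfold, pv_mapfold]
  set w := (PySem.List.pyGet? wandh 0).getD 0 with hw
  set h := (PySem.List.pyGet? wandh 1).getD 0 with hh
  rw [show ((PySem.List.pyRange 0 w 1).length) = w.toNat from by
        rw [PySem.List.length_pyRange_one]; omega,
      show ((PySem.List.pyRange 0 h 1).length) = h.toNat from by
        rw [PySem.List.length_pyRange_one]; omega]
  have hrowS : ("" ++ String.ofList (List.replicate w.toNat '.')) =
      String.ofList (List.replicate w.toNat '.') := by
    apply String.toList_inj.mp; simp
  rw [hrowS, List.nil_append]
  -- grids and their shapes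
  have hg0row : ∀ (i : Nat) (r : List Char),
      (List.replicate h.toNat (List.replicate w.toNat '.'))[i]? = some r →
      r.length = w.toNat := by
    intro i r hir
    rw [List.getElem?_replicate] at hir
    split at hir
    · cases hir; simp
    · cases hir
  have hs1 := pv_layer_shape '#' w h walls (List.replicate h.toNat (List.replicate w.toNat '.'))
  have hg1len : (pvDrawLayer walls '#' w h
      (List.replicate h.toNat (List.replicate w.toNat '.'))).length = h.toNat := by
    rw [hs1.1]; simp
  have hg1row : ∀ (i : Nat) (r : List Char),
      (pvDrawLayer walls '#' w h (List.replicate h.toNat (List.replicate w.toNat '.')))[i]? =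
        some r → r.length = w.toNat := by
    intro i r hir
    have h2 := hs1.2 i
    rw [hir] at h2
    cases hg : (List.replicate h.toNat (List.replicate w.toNat '.'))[i]? with
    | none => rw [hg] at h2; simp at h2
    | some r0 =>
      rw [hg] at h2
      simp only [Option.map_some, Option.some.injEq] at h2
      rw [h2]
      exact hg0row i r0 hg
  have hs2 := pv_layer_shape '*' w h path
    (pvDrawLayer walls '#' w h (List.replicate h.toNat (List.replicate w.toNat '.')))
  have hg2len : (pvDrawLayer path '*' w h (pvDrawLayer walls '#' w h
      (List.replicate h.toNat (List.replicate w.toNat '.')))).length = h.toNat := by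
    rw [hs2.1, hg1len]
  -- both sides, row by row
  apply List.ext_getElem?
  intro i
  rw [pv_rcim_getElem?, pv_rcim_getElem?, List.getElem?_map]
  by_cases hi : i < h.toNat
  · rw [List.getElem?_replicate, if_pos hi]
    have hig2 : i < (pvDrawLayer path '*' w h (pvDrawLayer walls '#' w h
        (List.replicate h.toNat (List.replicate w.toNat '.')))).length := by omega
    rw [List.getElem?_eq_getElem hig2]
    simp only [Option.map_some, Option.some.injEq]
    rw [← String.ofList_toList (s := pvRowOp path '*' (↑i) (pvRowOp walls '#' (↑i)
      (String.ofList (List.replicate w.toNat '.'))))]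
    apply congrArg String.ofList
    -- row equality, char by char
    apply List.ext_getElem?
    intro x
    have hrhs : (pvDrawLayer path '*' w h (pvDrawLayer walls '#' w h
        (List.replicate h.toNat (List.replicate w.toNat '.'))))[i][x]? =
        ((pvDrawLayer path '*' w h (pvDrawLayer walls '#' w h
          (List.replicate h.toNat (List.replicate w.toNat '.'))))[i]?.bind fun r => r[x]?) := by
      rw [List.getElem?_eq_getElem hig2, Option.bind_some]
    rw [hrhs]
    rw [pvRowOp_toList_getElem?, pvRowOp_toList_length, String.toList_ofList,
      List.length_replicate, pvRowOp_toList_getElem?, String.toList_ofList,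
      List.length_replicate, List.getElem?_replicate]
    by_cases hx : x < w.toNat
    · rw [pv_layer_cell '*' w h path _ hg1len hg1row x i hx hi,
        pv_layer_cell '#' w h walls _ (by simp) hg0row x i hx hi]
      have hcell0 : ((List.replicate h.toNat (List.replicate w.toNat '.'))[i]?.bind
          fun r => r[x]?) = some '.' := by
        rw [List.getElem?_replicate, if_pos hi, Option.bind_some,
          List.getElem?_replicate, if_pos hx]
      rw [hcell0]
      exact pv_cell_eq wandh path walls hD hPre x i hx hi
    · rw [if_neg (by tauto), if_neg (by tauto), if_neg hx]
      -- both sides none beyond the row width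
      have hrowlen : (pvDrawLayer path '*' w h (pvDrawLayer walls '#' w h
          (List.replicate h.toNat (List.replicate w.toNat '.'))))[i].length = w.toNat := by
        have h2 := hs2.2 i
        rw [List.getElem?_eq_getElem hig2] at h2
        cases hg : (pvDrawLayer walls '#' w h
            (List.replicate h.toNat (List.replicate w.toNat '.')))[i]? with
        | none => rw [hg] at h2; simp at h2
        | some r0 =>
          rw [hg] at h2
          simp only [Option.map_some, Option.some.injEq] at h2
          rw [h2]
          exact hg1row i r0 hg
      rw [List.getElem?_eq_getElem hig2, Option.bind_some,
        List.getElem?_eq_none_iff.mpr (by omega)]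
  · rw [List.getElem?_replicate, if_neg hi, List.getElem?_eq_none_iff.mpr (by omega)]
    rfl

theorem draw_map_changed : Claim_changed_draw_map := by unfold Claim_changed_draw_map; decide

theorem draw_map_tight : Claim_exact_draw_map := by
  intro wandh path walls hDom hPre hD hEq
  have hw0 : wandh.getD 0 0 = (PySem.List.pyGet? wandh 0).getD 0 := by
    rw [PySem.List.pyGet?_of_nonneg (h := by norm_num), List.getD_eq_getElem?_getD]
    rfl
  have hw1 : wandh.getD 1 0 = (PySem.List.pyGet? wandh 1).getD 0 := by
    rw [PySem.List.pyGet?_of_nonneg (h := by norm_num), List.getD_eq_getElem?_getD]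
    rfl
  rcases hD with ⟨hp2, p, hp, hdr⟩ | ⟨hw2, p, hw, hdr, hnp⟩
  · obtain ⟨hplen, ha0, haw, hb0, hbh⟩ := hdr
    rcases p with _ | ⟨a, p1⟩
    · simp at hplen
    rcases p1 with _ | ⟨b, p2⟩
    · simp at hplen
    rcases p2 with _ | ⟨e, p3⟩
    swap
    · simp at hplen
    rw [List.getD_cons_zero] at ha0
    rw [List.getD_cons_zero, hw0] at haw
    rw [List.getD_cons_succ, List.getD_cons_zero] at hb0
    rw [List.getD_cons_succ, List.getD_cons_zero, hw1] at hbh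
    have hx : a.toNat < ((PySem.List.pyGet? wandh 0).getD 0).toNat := by omega
    have hy : b.toNat < ((PySem.List.pyGet? wandh 1).getD 0).toNat := by omega
    have hA := pv_A_cell wandh path walls a.toNat b.toNat hx hy
    have hB := pv_B_cell wandh path walls a.toNat b.toNat hx hy
    rw [hEq, hB] at hA
    have hab : [((a.toNat : Nat) : Int), ((b.toNat : Nat) : Int)] = [a, b] := by
      have h1 : ((a.toNat : Nat) : Int) = a := by omega
      have h2 : ((b.toNat : Nat) : Int) = b := by omega
      rw [h1, h2]
    rw [hab] at hA
    injection hA with hc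
    -- B draws '*' at a path point, A's path layer is off (len 2)
    rw [if_pos hp,
      if_neg (show ¬ (path.length ≠ 2 ∧ [a, b] ∈ path) from fun hand => hand.1 hp2)] at hc
    revert hc
    split_ifs <;> decide
  · obtain ⟨hplen, ha0, haw, hb0, hbh⟩ := hdr
    rcases p with _ | ⟨a, p1⟩
    · simp at hplen
    rcases p1 with _ | ⟨b, p2⟩
    · simp at hplen
    rcases p2 with _ | ⟨e, p3⟩
    swap
    · simp at hplen
    rw [List.getD_cons_zero] at ha0
    rw [List.getD_cons_zero, hw0] at haw
    rw [List.getD_cons_succ, List.getD_cons_zero] at hb0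
    rw [List.getD_cons_succ, List.getD_cons_zero, hw1] at hbh
    have hx : a.toNat < ((PySem.List.pyGet? wandh 0).getD 0).toNat := by omega
    have hy : b.toNat < ((PySem.List.pyGet? wandh 1).getD 0).toNat := by omega
    have hA := pv_A_cell wandh path walls a.toNat b.toNat hx hy
    have hB := pv_B_cell wandh path walls a.toNat b.toNat hx hy
    rw [hEq, hB] at hA
    have hab : [((a.toNat : Nat) : Int), ((b.toNat : Nat) : Int)] = [a, b] := by
      have h1 : ((a.toNat : Nat) : Int) = a := by omega
      have h2 : ((b.toNat : Nat) : Int) = b := by omega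
      rw [h1, h2]
    rw [hab] at hA
    injection hA with hc
    -- B draws '#' at a wall point not in path, A's walls layer is off (len 2)
    rw [if_neg hnp, if_pos hw,
      if_neg (show ¬ (path.length ≠ 2 ∧ [a, b] ∈ path) from fun hand => hnp hand.2),
      if_neg (show ¬ (walls.length ≠ 2 ∧ [a, b] ∈ walls) from fun hand => hand.1 hw2)] at hc
    exact absurd hc (by decide)
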